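-- pv_equiv track=rewrite | github.com/sakib4535/news_api | text_processing.py | process_long_text
-- ===== SOURCE A (Python) =====
-- def process_long_text(long_text, max_tokens=500):
--     tokenized_text = long_text.split()  # Split text into tokens
--     processed_text = []
--     current_token_count = 0
--     current_chunk = []
--
--     for token in tokenized_text:
--         token_length = len(token.split())  # Consider multi-word tokens
--         if current_token_count + token_length <= max_tokens:
--             current_token_count += token_length
--             current_chunk.append(token)
--         else:
--             # If adding the token exceeds the limit, process the current chunk
--             processed_chunk = " ".join(current_chunk)
--             processed_text.append(processed_chunk)
--
--             # Start a new chunk with the current token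
--             current_chunk = [token]
--             current_token_count = token_length
--
--     # Process the remaining chunk
--     if current_chunk:
--         processed_chunk = " ".join(current_chunk)
--         processed_text.append(processed_chunk)
--
--     return processed_text
-- ===== SOURCE B (Python) =====
-- def process_long_text(long_text, max_tokens=500):
--     words = long_text.split()
--     return [" ".join(words[i:i + max_tokens]) for i in range(0, len(words), max_tokens)]
-- ===== Notes on version B (the rewrite author's own statement) =====
-- stated objective: idiomatic
-- what changed: B replaces A's running token counter with manual chunk flushing by a single stride-slicing comprehension over word start indices (words[i:i+max_tokens] for i in range(0, len(words), max_tokens)).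
-- outside the precondition, e.g. on process_long_text('a b', 0): A returns ['', 'a', 'b'], B raises ValueError; on process_long_text('a b', -1): A returns ['', 'a', 'b'], B returns []
import Mathlib
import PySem

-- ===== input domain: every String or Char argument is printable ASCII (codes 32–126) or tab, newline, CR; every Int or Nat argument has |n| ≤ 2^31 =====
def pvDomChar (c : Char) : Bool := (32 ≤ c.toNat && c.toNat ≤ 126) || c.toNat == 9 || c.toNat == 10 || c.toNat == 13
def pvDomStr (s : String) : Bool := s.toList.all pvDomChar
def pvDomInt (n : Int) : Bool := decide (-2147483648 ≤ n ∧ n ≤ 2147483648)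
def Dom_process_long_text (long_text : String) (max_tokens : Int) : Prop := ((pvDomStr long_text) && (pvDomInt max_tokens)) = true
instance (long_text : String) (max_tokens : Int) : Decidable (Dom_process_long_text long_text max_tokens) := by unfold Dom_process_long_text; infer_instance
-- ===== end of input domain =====

-- B chunks the words by positional stride slicing instead of A's running counter with manual flushing (objective: idiomatic).

-- ===== PORT A =====
-- loop body of A's for-loop: state = (processed_text, current_token_count, current_chunk)
def pvStepA (max_tokens : Int) (st : List String × Int × List String) (token : String) :
    List String × Int × List String :=
  let token_length : Int := PySem.List.len (PySem.Str.split₀ token)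
  if st.2.1 + token_length ≤ max_tokens then
    (st.1, st.2.1 + token_length, st.2.2 ++ [token])
  else
    (st.1 ++ [PySem.Str.join " " st.2.2], token_length, [token])

def process_long_text (long_text : String) (max_tokens : Int) : List String :=
  let tokenized_text := PySem.Str.split₀ long_text
  let st := tokenized_text.foldl (pvStepA max_tokens) ([], 0, [])
  if st.2.2.isEmpty then st.1 else st.1 ++ [PySem.Str.join " " st.2.2]

-- ===== PORT B =====
def process_long_text_alt (long_text : String) (max_tokens : Int) : List String :=
  let words := PySem.Str.split₀ long_text
  (PySem.List.pyRange 0 (PySem.List.len words) max_tokens).map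
    (fun i => PySem.Str.join " " (PySem.List.slice words (some i) (some (i + max_tokens))))

-- ===== PRECONDITION & SPEC =====
-- Pre_ excludes max_tokens ≤ 0: there A's leading empty chunk and singleton chunks are artifacts
-- of its flush logic, and B's stride range raises ValueError (step 0) or is empty (negative step).
def Pre_process_long_text (long_text : String) (max_tokens : Int) : Prop := 1 ≤ max_tokens
instance (long_text : String) (max_tokens : Int) : Decidable (Pre_process_long_text long_text max_tokens) := by
  unfold Pre_process_long_text; infer_instance

def pvWitness_process_long_text : String × Int := ("a b c", 2)

def Spec_process_long_text (long_text : String) (max_tokens : Int) (out : List String) : Prop :=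
  out = process_long_text_alt long_text max_tokens
instance (long_text : String) (max_tokens : Int) (out : List String) : Decidable (Spec_process_long_text long_text max_tokens out) := by
  unfold Spec_process_long_text; infer_instance

-- ===== CLAIM (what is proved, stated in full; the proofs are below) =====
def Claim_equal_process_long_text : Prop := ∀ (long_text : String) (max_tokens : Int), Dom_process_long_text long_text max_tokens → Pre_process_long_text long_text max_tokens → Spec_process_long_text long_text max_tokens (process_long_text long_text max_tokens)

-- ===== LEMMAS AND PROOFS =====

-- ---- facts about split₀ tokens: nonempty, whitespace-free, hence their own split has length 1 ----

theorem pv_go_nil (cur : List Char) (acc : List (List Char)) :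
    PySem.Chars.split₀.go [] cur acc =
      if cur.isEmpty then acc.reverse else (cur.reverse :: acc).reverse := by
  rw [PySem.Chars.split₀.go.eq_def]

theorem pv_go_cons (c : Char) (rest cur : List Char) (acc : List (List Char)) :
    PySem.Chars.split₀.go (c :: rest) cur acc =
      if PySem.Chars.isspace c then
        (if cur.isEmpty then PySem.Chars.split₀.go rest [] acc
         else PySem.Chars.split₀.go rest [] (cur.reverse :: acc))
      else PySem.Chars.split₀.go rest (c :: cur) acc := by
  rw [PySem.Chars.split₀.go.eq_def]

theorem pv_go_nonspace (t cur : List Char) (acc : List (List Char))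
    (h : ∀ c ∈ t, PySem.Chars.isspace c = false) :
    PySem.Chars.split₀.go t cur acc =
      if cur.reverse ++ t = [] then acc.reverse else acc.reverse ++ [cur.reverse ++ t] := by
  induction t generalizing cur with
  | nil =>
      rw [pv_go_nil]
      simp only [List.isEmpty_iff, List.append_nil]
      split_ifs with h1 h2 h2 <;> simp_all
  | cons c t ih =>
      have hc : PySem.Chars.isspace c = false := h c (by simp)
      rw [pv_go_cons]
      simp only [hc, Bool.false_eq_true, if_false]
      rw [ih (c :: cur) (fun x hx => h x (by simp [hx]))]
      simp

theorem pv_mem_go (s : List Char) (cur : List Char) (acc : List (List Char))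
    (hcur : ∀ c ∈ cur, PySem.Chars.isspace c = false)
    (hacc : ∀ w ∈ acc, w ≠ [] ∧ ∀ c ∈ w, PySem.Chars.isspace c = false) :
    ∀ t ∈ PySem.Chars.split₀.go s cur acc, t ≠ [] ∧ ∀ c ∈ t, PySem.Chars.isspace c = false := by
  induction s generalizing cur acc with
  | nil =>
      intro t ht
      rw [pv_go_nil] at ht
      by_cases h1 : cur.isEmpty = true
      · rw [if_pos h1] at ht
        exact hacc t (by simpa using ht)
      · rw [if_neg h1] at ht
        have hcur' : cur ≠ [] := by simpa [List.isEmpty_iff] using h1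
        rcases (by simpa using ht : t ∈ acc ∨ t = cur.reverse) with h | h
        · exact hacc t h
        · subst h
          refine ⟨by rw [ne_eq, List.reverse_eq_nil_iff]; exact hcur', ?_⟩
          intro c hc; exact hcur c (by simpa using hc)
  | cons c rest ih =>
      intro t ht
      rw [pv_go_cons] at ht
      by_cases hc : PySem.Chars.isspace c = true
      · rw [if_pos hc] at ht
        by_cases h1 : cur.isEmpty = true
        · rw [if_pos h1] at ht
          exact ih [] acc (by simp) hacc t ht
        · rw [if_neg h1] at ht
          have hcur' : cur ≠ [] := by simpa [List.isEmpty_iff] using h1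
          refine ih [] (cur.reverse :: acc) (by simp) ?_ t ht
          intro w hw
          rcases List.mem_cons.mp hw with h | h
          · subst h
            refine ⟨by rw [ne_eq, List.reverse_eq_nil_iff]; exact hcur', ?_⟩
            intro x hx; exact hcur x (by simpa using hx)
          · exact hacc w h
      · rw [if_neg hc] at ht
        refine ih (c :: cur) acc ?_ hacc t ht
        intro x hx
        rcases List.mem_cons.mp hx with h | h
        · subst h; simpa using hc
        · exact hcur x h

theorem pv_mem_split₀ (s t : List Char) (h : t ∈ PySem.Chars.split₀ s) :
    t ≠ [] ∧ ∀ c ∈ t, PySem.Chars.isspace c = false :=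
  pv_mem_go s [] [] (by simp) (by simp) t h

theorem pv_split₀_token (t : List Char) (h1 : t ≠ []) (h2 : ∀ c ∈ t, PySem.Chars.isspace c = false) :
    PySem.Chars.split₀ t = [t] := by
  show PySem.Chars.split₀.go t [] [] = [t]
  rw [pv_go_nonspace t [] [] h2]
  simp [h1]

theorem pv_token_len_one (s : String) (t : String) (h : t ∈ PySem.Str.split₀ s) :
    PySem.List.len (PySem.Str.split₀ t) = 1 := by
  rw [PySem.Str.split₀.eq_1] at h
  rcases List.mem_map.mp h with ⟨w, hw, rfl⟩
  obtain ⟨hne, hns⟩ := pv_mem_split₀ s.toList w hw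
  rw [PySem.Str.split₀.eq_1]
  rw [show (String.ofList w).toList = w from String.toList_ofList]
  rw [pv_split₀_token w hne hns]
  simp [PySem.List.len]

-- ---- the common grouping: chunks of m words (the last one shorter) ----

def pvChunks (m : Nat) : List String → List (List String)
  | [] => []
  | w :: rest => (w :: rest.take (m - 1)) :: pvChunks m (rest.drop (m - 1))
termination_by ws => ws.length
decreasing_by simp

theorem pvChunks_small (m : Nat) (ws : List String) (h0 : ws ≠ []) (h : ws.length ≤ m) :
    pvChunks m ws = [ws] := by
  match ws with
  | w :: rest =>
      have h1 : rest.take (m - 1) = rest := List.take_of_length_le (by simp at h; omega)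
      have h2 : rest.drop (m - 1) = [] := List.drop_eq_nil_of_le (by simp at h; omega)
      simp [pvChunks, h1, h2]

theorem pvChunks_full (m : Nat) (hm : 0 < m) (ws ys : List String) (h : ws.length = m) :
    pvChunks m (ws ++ ys) = ws :: pvChunks m ys := by
  match ws with
  | [] => simp at h; omega
  | w :: rest =>
      rw [List.cons_append]
      have hr : rest.length = m - 1 := by simp at h; omega
      have h1 : (rest ++ ys).take (m - 1) = rest := by
        rw [List.take_append_of_le_length (by omega), List.take_of_length_le (by omega)]
      have h2 : (rest ++ ys).drop (m - 1) = ys := by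
        rw [List.drop_append_of_le_length (by omega), List.drop_eq_nil_of_le (by omega)]
        simp
      simp [pvChunks, h1, h2]

-- ---- A equals the chunking ----

theorem pv_A_run (mt : Int) (hm : 1 ≤ mt) (ws : List String) :
    ∀ (P ch : List String),
      (∀ t ∈ ws, PySem.List.len (PySem.Str.split₀ t) = 1) → ch ≠ [] → (ch.length : Int) ≤ mt →
      (if (ws.foldl (pvStepA mt) (P, (ch.length : Int), ch)).2.2 = []
       then (ws.foldl (pvStepA mt) (P, (ch.length : Int), ch)).1
       else (ws.foldl (pvStepA mt) (P, (ch.length : Int), ch)).1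
            ++ [PySem.Str.join " " (ws.foldl (pvStepA mt) (P, (ch.length : Int), ch)).2.2])
      = P ++ (pvChunks mt.toNat (ch ++ ws)).map (fun g => PySem.Str.join " " g) := by
  induction ws with
  | nil =>
      intro P ch _ hne hle
      simp only [List.foldl_nil]
      rw [pvChunks_small mt.toNat (ch ++ []) (by simpa using hne) (by simp; omega)]
      simp [hne]
  | cons w rest ih =>
      intro P ch hall hne hle
      have hw1 : PySem.List.len (PySem.Str.split₀ w) = 1 := hall w (by simp)
      simp only [List.foldl_cons, pvStepA, hw1]
      by_cases hfit : (ch.length : Int) + 1 ≤ mt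
      · rw [if_pos hfit]
        have H := ih P (ch ++ [w]) (fun t ht => hall t (by simp [ht])) (by simp) (by simp; omega)
        rw [show (((ch ++ [w]).length : Nat) : Int) = (ch.length : Int) + 1 by simp] at H
        rw [H]
        simp
      · rw [if_neg hfit]
        have hchm : ch.length = mt.toNat := by omega
        have H := ih (P ++ [PySem.Str.join " " ch]) [w] (fun t ht => hall t (by simp [ht]))
          (by simp) (by simp; omega)
        rw [show (([w].length : Nat) : Int) = (1 : Int) by simp] at H
        rw [H]
        rw [show ch ++ w :: rest = ch ++ ([w] ++ rest) by simp]
        rw [pvChunks_full mt.toNat (by omega) ch ([w] ++ rest) hchm]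
        simp

theorem pv_A_eq (long_text : String) (mt : Int) (hm : 1 ≤ mt) :
    process_long_text long_text mt
      = (pvChunks mt.toNat (PySem.Str.split₀ long_text)).map (fun g => PySem.Str.join " " g) := by
  simp only [process_long_text, List.isEmpty_iff]
  match hws : PySem.Str.split₀ long_text with
  | [] => simp [pvChunks]
  | w :: rest =>
      have hall : ∀ t ∈ (w :: rest), PySem.List.len (PySem.Str.split₀ t) = 1 := by
        intro t ht; exact pv_token_len_one long_text t (hws ▸ ht)
      have hw1 : PySem.List.len (PySem.Str.split₀ w) = 1 := hall w (by simp)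
      simp only [List.foldl_cons, pvStepA, hw1]
      rw [if_pos (by omega : (0 : Int) + 1 ≤ mt)]
      have H := pv_A_run mt hm rest [] [w] (fun t ht => hall t (by simp [ht])) (by simp) (by simp; omega)
      rw [show (([w].length : Nat) : Int) = (1 : Int) by simp] at H
      rw [show ((0 : Int) + 1) = (1 : Int) by norm_num]
      simp only [List.nil_append]
      rw [H]
      simp

-- ---- B equals the chunking ----

theorem pv_pyRange_shift (a b s : Int) (hs : 0 < s) :
    PySem.List.pyRange a b s = (PySem.List.pyRange 0 (b - a) s).map (fun x => a + x) := by
  rw [PySem.List.pyRange_of_pos _ _ hs, PySem.List.pyRange_of_pos _ _ hs]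
  rw [List.map_map]
  have : (if a < b then ((b - a + s - 1) / s).toNat else 0)
       = (if 0 < b - a then ((b - a - 0 + s - 1) / s).toNat else 0) := by
    simp only [sub_zero]
    congr 1
    simp only [eq_iff_iff]
    omega
  rw [this]
  apply List.map_congr_left
  intro k _
  simp [Function.comp]

theorem pv_pyRange_pos_cons (b s : Int) (hs : 0 < s) (hb : 0 < b) :
    PySem.List.pyRange 0 b s = 0 :: PySem.List.pyRange s b s := by
  rw [PySem.List.pyRange_of_pos _ _ hs, PySem.List.pyRange_of_pos _ _ hs]
  have hq1 : (b - 0 + s - 1) / s = (b - 1) / s + 1 := by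
    rw [show b - 0 + s - 1 = (b - 1) + 1 * s by ring, Int.add_mul_ediv_right _ _ (by omega)]
  have hq0 : 0 ≤ (b - 1) / s := Int.ediv_nonneg (by omega) (by omega)
  rw [if_pos hb, hq1]
  by_cases hsb : s < b
  · rw [if_pos hsb]
    rw [show (b - s + s - 1) = b - 1 by ring]
    rw [show ((b - 1) / s + 1).toNat = ((b - 1) / s).toNat + 1 by omega]
    rw [List.range_succ_eq_map]
    simp only [List.map_cons, List.map_map]
    congr 1
    · norm_num
    · apply List.map_congr_left
      intro k _
      simp only [Function.comp]
      push_cast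
      ring
  · rw [if_neg hsb]
    have hq : (b - 1) / s = 0 := Int.ediv_eq_zero_of_lt (by omega) (by omega)
    rw [hq]
    norm_num

theorem pv_slice_drop_shift {α : Type} (ws : List α) (d x mt : Int)
    (hd : 0 ≤ d) (hx : 0 ≤ x) (hmt : 0 ≤ mt) :
    PySem.List.slice ws (some (d + x)) (some (d + x + mt))
      = PySem.List.slice (ws.drop d.toNat) (some x) (some (x + mt)) := by
  rw [PySem.List.slice_toNat _ (by omega) (by omega), PySem.List.slice_toNat _ (by omega) (by omega)]
  rw [List.drop_drop]
  congr 1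
  · omega
  · congr 1
    omega

theorem pv_B_run (mt : Int) (hm : 1 ≤ mt) :
    ∀ (n : Nat) (ws : List String), ws.length ≤ n →
    (PySem.List.pyRange 0 (PySem.List.len ws) mt).map
        (fun i => PySem.Str.join " " (PySem.List.slice ws (some i) (some (i + mt))))
      = (pvChunks mt.toNat ws).map (fun g => PySem.Str.join " " g) := by
  intro n
  induction n with
  | zero =>
      intro ws hlen
      have : ws = [] := List.eq_nil_of_length_eq_zero (by omega)
      subst this
      rw [PySem.List.len_eq]
      simp only [List.length_nil, Nat.cast_zero]
      rw [PySem.List.pyRange_of_pos _ _ (by omega : (0:Int) < mt)]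
      simp [pvChunks]
  | succ n ihn =>
      intro ws hlen
      match ws with
      | [] =>
          rw [PySem.List.len_eq]
          simp only [List.length_nil, Nat.cast_zero]
          rw [PySem.List.pyRange_of_pos _ _ (by omega : (0:Int) < mt)]
          simp [pvChunks]
      | w :: rest =>
          rw [PySem.List.len_eq]
          rw [pv_pyRange_pos_cons _ mt (by omega) (by simp)]
          rw [List.map_cons]
          rw [pv_pyRange_shift mt _ mt (by omega)]
          rw [List.map_map]
          -- head chunk
          have hhead : PySem.Str.join " " (PySem.List.slice (w :: rest) (some 0) (some (0 + mt)))
              = PySem.Str.join " " (w :: rest.take (mt.toNat - 1)) := by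
            rw [zero_add, PySem.List.slice_toNat _ (by omega) (by omega)]
            simp only [Int.toNat_zero, List.drop_zero, Nat.sub_zero]
            rw [show (w :: rest).take mt.toNat = w :: rest.take (mt.toNat - 1) by
              rw [show mt.toNat = (mt.toNat - 1) + 1 by omega, List.take_succ_cons]
              norm_num]
          -- tail chunks
          have htail : ((PySem.List.pyRange 0 ((((w :: rest).length : Nat) : Int) - mt) mt).map
                ((fun i => PySem.Str.join " " (PySem.List.slice (w :: rest) (some i) (some (i + mt)))) ∘ (fun x => mt + x)))
              = (pvChunks mt.toNat (rest.drop (mt.toNat - 1))).map (fun g => PySem.Str.join " " g) := by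
            have hdrop : (w :: rest).drop mt.toNat = rest.drop (mt.toNat - 1) := by
              rw [show mt.toNat = (mt.toNat - 1) + 1 by omega, List.drop_succ_cons]
              norm_num
            have step1 : ((PySem.List.pyRange 0 ((((w :: rest).length : Nat) : Int) - mt) mt).map
                  ((fun i => PySem.Str.join " " (PySem.List.slice (w :: rest) (some i) (some (i + mt)))) ∘ (fun x => mt + x)))
                = (PySem.List.pyRange 0 ((((w :: rest).length : Nat) : Int) - mt) mt).map
                  (fun x => PySem.Str.join " " (PySem.List.slice ((w :: rest).drop mt.toNat) (some x) (some (x + mt)))) := by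
              apply List.map_congr_left
              intro x hx
              have hx0 : 0 ≤ x := by
                have := (PySem.List.mem_pyRange_iff_of_pos (by omega : (0:Int) < mt) x).mp hx
                omega
              simp only [Function.comp]
              rw [pv_slice_drop_shift (w :: rest) mt x mt (by omega) hx0 (by omega)]
            rw [step1, hdrop]
            have hrange : PySem.List.pyRange 0 ((((w :: rest).length : Nat) : Int) - mt) mt
                = PySem.List.pyRange 0 (PySem.List.len (rest.drop (mt.toNat - 1))) mt := by
              rw [PySem.List.len_eq]
              by_cases hc : mt ≤ (((w :: rest).length : Nat) : Int)
              · congr 1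
                simp only [List.length_drop, List.length_cons] at *
                push_cast
                omega
              · rw [PySem.List.pyRange_of_pos _ _ (by omega : (0:Int) < mt),
                    PySem.List.pyRange_of_pos _ _ (by omega : (0:Int) < mt)]
                rw [if_neg (by omega), if_neg (by
                  simp only [List.length_drop, List.length_cons] at *
                  omega)]
            rw [hrange]
            exact ihn (rest.drop (mt.toNat - 1)) (by simp at hlen ⊢; omega)
          rw [hhead, htail]
          simp [pvChunks]

theorem pv_B_eq (long_text : String) (mt : Int) (hm : 1 ≤ mt) :
    process_long_text_alt long_text mt
      = (pvChunks mt.toNat (PySem.Str.split₀ long_text)).map (fun g => PySem.Str.join " " g) := by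
  simp only [process_long_text_alt]
  exact pv_B_run mt hm (PySem.Str.split₀ long_text).length (PySem.Str.split₀ long_text) le_rfl

-- ===== VERDICT (by name: the statement is the Claim_ definition above) =====
theorem process_long_text_spec : Claim_equal_process_long_text := by
  intro long_text max_tokens _ hpre
  unfold Spec_process_long_text
  rw [pv_A_eq long_text max_tokens hpre, pv_B_eq long_text max_tokens hpre]
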